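-- pv_equiv track=rewrite | github.com/andrewmcloud/advent2024 | advent2024/day19.py | part2
-- ===== SOURCE A (Python) =====
-- def part2(patterns, towels):
--     options = []
--
--     for pattern in patterns:
--         n = len(pattern)
--         dp = [0] * (n + 1)
--         dp[0] = 1
--
--         for i in range(1, n + 1):
--             for towel in towels:
--                 m = len(towel)
--                 dp[i] += dp[i-m] if i >= len(towel) and pattern[i-m:].startswith(towel) else 0
--         options.append(dp[n])
--     return sum(options)
-- ===== SOURCE B (Python) =====
-- def part2(patterns, towels):
--     # Index the towels once: occurrence count per towel and the longest length,
--     # then fill each pattern's dp table probing only substrings of length 1..maxlen.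
--     cnt = {}
--     maxlen = 0
--     for t in towels:
--         cnt[t] = cnt.get(t, 0) + 1
--         if len(t) > maxlen:
--             maxlen = len(t)
--     total = 0
--     for pattern in patterns:
--         n = len(pattern)
--         dp = [1]
--         for i in range(1, n + 1):
--             acc = 0
--             for m in range(1, min(i, maxlen) + 1):
--                 acc += cnt.get(pattern[i - m:i], 0) * dp[i - m]
--             dp.append(acc)
--         total += dp[n]
--     return total
-- ===== Notes on version B (the rewrite author's own statement) =====
-- stated objective: faster
-- what changed: B indexes the towels once into an occurrence-count dict plus the maximum towel length and per dp cell probes only the substrings of length 1..maxlen against that dict, replacing A's inner scan over the whole towel list at every position; Pre_ excludes towel lists where an empty towel follows a nonempty one: a length-0 towel can be inserted arbitrarily often, so no finite count is specified there and A's and B's values (A doubles earlier towels' contributions per later empty, B counts arrangements of nonempty towels) are both arbitrary.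
-- outside the precondition, e.g. on part2(['a'], ['a', '']): A returns 2, B returns 1
import Mathlib
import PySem

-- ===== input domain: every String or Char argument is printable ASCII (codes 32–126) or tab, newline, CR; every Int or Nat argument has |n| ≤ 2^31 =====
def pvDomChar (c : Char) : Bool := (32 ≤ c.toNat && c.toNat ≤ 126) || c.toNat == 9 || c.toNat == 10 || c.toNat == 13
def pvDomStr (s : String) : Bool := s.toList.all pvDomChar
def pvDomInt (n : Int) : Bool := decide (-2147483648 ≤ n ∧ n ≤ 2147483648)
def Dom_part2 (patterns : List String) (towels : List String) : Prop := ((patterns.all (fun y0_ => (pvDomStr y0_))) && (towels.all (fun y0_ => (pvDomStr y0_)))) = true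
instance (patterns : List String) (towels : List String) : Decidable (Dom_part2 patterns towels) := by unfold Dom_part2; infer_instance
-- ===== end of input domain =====

-- B replaces A's inner scan over the whole towel list at every dp cell by an occurrence-count
-- dict of the towels built once, probed by substring length up to the longest towel (faster).

-- ===== PORT A =====
-- one inner-loop step 'dp[i] += dp[i-m] if i >= len(towel) and pattern[i-m:].startswith(towel) else 0'
-- (1 ≤ i ≤ n, so the dp indexing is in range: pyGetD/set are exact there)
def stepA (p : List Char) (i : Int) (dp : List Int) (towel : String) : List Int :=
  let m : Int := (towel.toList.length : Int)
  dp.set i.toNat (PySem.List.pyGetD dp i 0 +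
    (if m ≤ i ∧ PySem.Chars.startswith (PySem.List.slice p (some (i - m)) none) towel.toList
     then PySem.List.pyGetD dp (i - m) 0 else 0))

-- inner loop 'for towel in towels: …'
def innerA (towels : List String) (p : List Char) (dp : List Int) (i : Int) : List Int :=
  towels.foldl (stepA p i) dp

-- per-pattern body of A's outer loop: builds dp[0..n] and returns dp[n]
def rowA (towels : List String) (pattern : String) : Int :=
  let p := pattern.toList
  let n : Int := (p.length : Int)
  let dp := (PySem.List.pyRange 1 (n + 1) 1).foldl (innerA towels p)
              ((List.replicate (n.toNat + 1) (0 : Int)).set 0 1)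
  PySem.List.pyGetD dp n 0

def part2 (patterns : List String) (towels : List String) : Int :=
  (patterns.foldl (fun options pattern => options ++ [rowA towels pattern]) []).sum

-- ===== PORT B =====
-- per-pattern body of B's loop: dp built by append, inner sum over substring lengths 1..min(i, maxlen)
def rowB (cnt : PySem.Dict String Int) (maxlen : Int) (pattern : String) : Int :=
  let p := pattern.toList
  let n : Int := (p.length : Int)
  let dp := (PySem.List.pyRange 1 (n + 1) 1).foldl (fun dp i =>
      dp ++ [(PySem.List.pyRange 1 (min i maxlen + 1) 1).foldl (fun acc m =>
        acc + cnt.getD (String.ofList (PySem.List.slice p (some (i - m)) (some i))) 0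
                * PySem.List.pyGetD dp (i - m) 0) 0]) [(1 : Int)]
  PySem.List.pyGetD dp n 0

def part2_alt (patterns : List String) (towels : List String) : Int :=
  -- 'for t in towels: …' building (cnt, maxlen)
  let idx := towels.foldl (fun (acc : PySem.Dict String Int × Int) t =>
      (acc.1.insert t (acc.1.getD t 0 + 1),
       if acc.2 < (t.toList.length : Int) then (t.toList.length : Int) else acc.2))
    (PySem.Dict.empty, 0)
  patterns.foldl (fun total pattern => total + rowB idx.1 idx.2 pattern) 0

-- ===== PRECONDITION & SPEC =====
-- Pre_ excludes towel lists in which an empty towel occurs AFTER some nonempty towel: a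
-- length-0 towel can be inserted arbitrarily often into any arrangement, so no finite count is
-- specified on that corner and any returned value (A doubles earlier towels' contributions per
-- later empty, B counts arrangements of the nonempty towels) is equally defensible; empty
-- towels that only precede every nonempty towel are inert in both programs and stay inside.
def Pre_part2 (patterns : List String) (towels : List String) : Prop :=
  ∀ t ∈ towels.dropWhile (fun t => t = ""), t ≠ ""
instance (patterns : List String) (towels : List String) : Decidable (Pre_part2 patterns towels) := by unfold Pre_part2; infer_instance

def pvWitness_part2 : List String × List String := (["ab", "aab"], ["a", "b", "ab"])

def Spec_part2 (patterns : List String) (towels : List String) (out : Int) : Prop := out = part2_alt patterns towels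
instance (patterns : List String) (towels : List String) (out : Int) : Decidable (Spec_part2 patterns towels out) := by unfold Spec_part2; infer_instance

-- ===== CLAIM (what is proved, stated in full; the proofs are below) =====
def Claim_equal_part2 : Prop := ∀ (patterns : List String) (towels : List String), Dom_part2 patterns towels → Pre_part2 patterns towels → Spec_part2 patterns towels (part2 patterns towels)

-- ===== LEMMAS AND PROOFS =====

-- weight of a towel occurrence: 2 ^ (number of empty towels after it); under Pre_ this is 1
def Epow (ts : List String) : Int := 2 ^ (ts.count "")

-- the towels with their weights, empty towels dropped
def wt : List String → List (String × Int)
  | [] => []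
  | t :: ts => if t = "" then wt ts else (t, Epow ts) :: wt ts

-- contribution of weighted towel e to dp[k]
def termW (p : List Char) (prev : List Int) (k : Nat) (e : String × Int) : Int :=
  if e.1.toList.length ≤ k ∧ e.1.toList <+: p.drop (k - e.1.toList.length)
  then e.2 * prev.getD (k - e.1.toList.length) 0 else 0

-- total weight of towel string s
def wsum (s : String) (es : List (String × Int)) : Int :=
  (es.map (fun e => if e.1 = s then e.2 else 0)).sum

-- reference dp table, built front-to-back
def dpRef (p : List Char) (towels : List String) : Nat → List Int
  | 0 => [1]
  | (k+1) => dpRef p towels k ++ [((wt towels).map (termW p (dpRef p towels k) (k+1))).sum]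

theorem Epow_cons_empty (ts : List String) : Epow ("" :: ts) = 2 * Epow ts := by
  simp [Epow, pow_succ]
  ring

theorem Epow_cons_ne (t : String) (ts : List String) (ht : t ≠ "") :
    Epow (t :: ts) = Epow ts := by
  simp [Epow, ht]

theorem wt_mem (ts : List String) (e : String × Int) (he : e ∈ wt ts) :
    e.1 ∈ ts ∧ e.1 ≠ "" := by
  induction ts with
  | nil => simp [wt] at he
  | cons t ts ih =>
    by_cases ht : t = ""
    · simp only [wt, if_pos ht] at he
      rcases ih he with ⟨h1, h2⟩
      exact ⟨List.mem_cons_of_mem _ h1, h2⟩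
    · simp only [wt, if_neg ht] at he
      rcases List.mem_cons.1 he with h | h
      · subst h; exact ⟨List.mem_cons_self, ht⟩
      · rcases ih h with ⟨h1, h2⟩
        exact ⟨List.mem_cons_of_mem _ h1, h2⟩

theorem ne_empty_len (t : String) (ht : t ≠ "") : t.toList.length ≠ 0 := by
  intro h
  apply ht
  have h2 : t.toList = [] := List.length_eq_zero_iff.mp h
  rw [← String.toList_inj, h2]; rfl

theorem dpRef_length (p : List Char) (towels : List String) (k : Nat) :
    (dpRef p towels k).length = k + 1 := by
  induction k with
  | zero => rfl
  | succ k ih => simp [dpRef, ih]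

theorem set_getD_self (l : List Int) (k : Nat) (h : k < l.length) :
    l.set k (l.getD k 0) = l := by
  simp [List.getD_eq_getElem?_getD, List.getElem?_eq_getElem h, List.set_getElem_self]

theorem termW_set (p : List Char) (dp : List Int) (k : Nat) (v : Int) (e : String × Int)
    (he : e.1.toList.length ≠ 0) :
    termW p (dp.set k v) k e = termW p dp k e := by
  unfold termW
  split_ifs with h
  · rw [List.getD_eq_getElem?_getD, List.getD_eq_getElem?_getD,
      List.getElem?_set_ne (by omega)]
  · rfl

-- A's inner towel loop at cell k, as a closed sum over the weighted towels
theorem foldl_stepA (p : List Char) (k : Nat) :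
    ∀ (ts : List String) (dp : List Int), k < dp.length →
    ts.foldl (stepA p (k : Int)) dp
      = dp.set k (dp.getD k 0 * Epow ts + ((wt ts).map (termW p dp k)).sum) := by
  intro ts
  induction ts with
  | nil =>
    intro dp hk
    simp only [List.foldl_nil, wt, List.map_nil, List.sum_nil, add_zero, Epow,
      List.count_nil, pow_zero, mul_one]
    exact (set_getD_self dp k hk).symm
  | cons t ts ih =>
    intro dp hk
    rw [List.foldl_cons]
    by_cases ht : t = ""
    · subst ht
      have hstep : stepA p (k : Int) dp ""
          = dp.set k (dp.getD k 0 + dp.getD k 0) := by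
        unfold stepA
        simp [PySem.List.pyGetD_natCast, PySem.Chars.startswith_iff, List.nil_prefix]
      rw [hstep, ih _ (by simpa using hk)]
      rw [List.set_set]
      have hget : (dp.set k (dp.getD k 0 + dp.getD k 0)).getD k 0 = dp.getD k 0 + dp.getD k 0 := by
        simp [List.getD_eq_getElem?_getD, List.getElem?_set_self hk]
      rw [hget]
      have hmap : (wt ts).map (termW p (dp.set k (dp.getD k 0 + dp.getD k 0)) k)
          = (wt ts).map (termW p dp k) := by
        apply List.map_congr_left
        intro e he
        exact termW_set p dp k _ e (ne_empty_len e.1 (wt_mem ts e he).2)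
      rw [hmap]
      have hwt : wt ("" :: ts) = wt ts := by simp [wt]
      rw [hwt, Epow_cons_empty]
      congr 1
      ring
    · -- nonempty towel: the step adds the (unweighted) match contribution
      have hc : stepA p (k : Int) dp t
          = dp.set k (dp.getD k 0 +
              (if t.toList.length ≤ k ∧ t.toList <+: p.drop (k - t.toList.length)
               then dp.getD (k - t.toList.length) 0 else 0)) := by
        unfold stepA
        by_cases hle : t.toList.length ≤ k
        · have h2 : (k : Int) - (t.toList.length : Int) = ((k - t.toList.length : Nat) : Int) := by
            omega
          simp only [h2]
          simp [PySem.List.pyGetD_natCast, PySem.List.slice_from_natCast,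
            PySem.Chars.startswith_iff]
        · have h1 : ¬ t.length ≤ k := by simpa [String.length_toList] using hle
          simp [PySem.List.pyGetD_natCast, h1]
      rw [hc, ih _ (by simpa using hk)]
      set c := (if t.toList.length ≤ k ∧ t.toList <+: p.drop (k - t.toList.length)
                then dp.getD (k - t.toList.length) 0 else 0) with hcdef
      rw [List.set_set]
      have hget : (dp.set k (dp.getD k 0 + c)).getD k 0 = dp.getD k 0 + c := by
        simp [List.getD_eq_getElem?_getD, List.getElem?_set_self hk]
      rw [hget]
      have hmap : (wt ts).map (termW p (dp.set k (dp.getD k 0 + c)) k)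
          = (wt ts).map (termW p dp k) := by
        apply List.map_congr_left
        intro e he
        exact termW_set p dp k _ e (ne_empty_len e.1 (wt_mem ts e he).2)
      rw [hmap]
      have hwt : wt (t :: ts) = (t, Epow ts) :: wt ts := by simp [wt, ht]
      rw [hwt, Epow_cons_ne t ts ht]
      simp only [List.map_cons, List.sum_cons]
      have htermW : termW p dp k (t, Epow ts) = Epow ts * c := by
        unfold termW
        rw [hcdef]
        split_ifs with h
        · rfl
        · ring
      rw [htermW]
      congr 1
      ring

theorem innerA_eq (towels : List String) (p : List Char) (dp : List Int) (k : Nat)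
    (hk : k < dp.length) :
    innerA towels p dp (k : Int)
      = dp.set k (dp.getD k 0 * Epow towels + ((wt towels).map (termW p dp k)).sum) := by
  unfold innerA
  exact foldl_stepA p k towels dp hk

theorem rowA_loop (towels : List String) (p : List Char) :
    ∀ j, j ≤ p.length →
    (PySem.List.pyRange 1 ((j : Int) + 1) 1).foldl (innerA towels p)
        ((List.replicate (p.length + 1) (0 : Int)).set 0 1)
      = dpRef p towels j ++ List.replicate (p.length - j) 0 := by
  intro j
  induction j with
  | zero =>
    intro _
    rw [show ((0 : Nat) : Int) + 1 = 1 by norm_num, PySem.List.pyRange_one_eq_nil le_rfl]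
    simp [dpRef, List.replicate_succ]
  | succ j ih =>
    intro hj
    have hj' : j ≤ p.length := Nat.le_of_succ_le hj
    have hcast : ((j + 1 : Nat) : Int) + 1 = ((j : Int) + 1) + 1 := by push_cast; ring
    rw [hcast, PySem.List.pyRange_one_succ_right (by omega), List.foldl_append]
    rw [ih hj']
    simp only [List.foldl_cons, List.foldl_nil]
    have hlenRef : (dpRef p towels j).length = j + 1 := dpRef_length p towels j
    have hcast2 : ((j : Int) + 1) = ((j + 1 : Nat) : Int) := by push_cast; ring
    rw [hcast2, innerA_eq towels p _ (j + 1)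
      (by simp [List.length_append, hlenRef]; omega)]
    set dp := dpRef p towels j ++ List.replicate (p.length - j) 0 with hdp
    have hget : dp.getD (j + 1) 0 = 0 := by
      rw [hdp, List.getD_append_right _ _ _ _ (by omega)]
      rw [hlenRef]
      simp only [Nat.sub_self]
      rw [List.getD_eq_getElem?_getD, List.getElem?_replicate]
      simp [show 0 < p.length - j by omega]
    have hmap : (wt towels).map (termW p dp (j + 1)) = (wt towels).map (termW p (dpRef p towels j) (j + 1)) := by
      apply List.map_congr_left
      intro e he
      have ht0 : e.1.toList.length ≠ 0 := ne_empty_len e.1 (wt_mem towels e he).2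
      unfold termW
      split_ifs with h
      · rw [hdp, List.getD_append _ _ _ _ (by omega)]
      · rfl
    rw [hget, hmap, zero_mul, zero_add]
    rw [hdp, List.set_append, if_neg (by omega)]
    rw [hlenRef, show j + 1 - (j + 1) = 0 by omega]
    rw [show p.length - j = (p.length - (j + 1)) + 1 by omega, List.replicate_succ]
    simp [dpRef]

theorem rowA_eq (towels : List String) (pattern : String) :
    rowA towels pattern
      = (dpRef pattern.toList towels pattern.toList.length).getD pattern.toList.length 0 := by
  unfold rowA
  simp only [Int.toNat_natCast]
  rw [rowA_loop towels pattern.toList pattern.toList.length le_rfl]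
  simp [PySem.List.pyGetD_natCast]

-- B-side: the towel index (cnt, maxlen) built by the forward fold
theorem idxF (ts : List String) :
    ∀ (d : PySem.Dict String Int) (x : Int),
    (∀ s, (ts.foldl (fun (acc : PySem.Dict String Int × Int) t =>
        (acc.1.insert t (acc.1.getD t 0 + 1),
         if acc.2 < (t.toList.length : Int) then (t.toList.length : Int) else acc.2)) (d, x)).1.getD s 0
      = d.getD s 0 + (ts.count s : Int))
    ∧ x ≤ (ts.foldl (fun (acc : PySem.Dict String Int × Int) t =>
        (acc.1.insert t (acc.1.getD t 0 + 1),
         if acc.2 < (t.toList.length : Int) then (t.toList.length : Int) else acc.2)) (d, x)).2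
    ∧ (∀ t ∈ ts, (t.toList.length : Int) ≤
        (ts.foldl (fun (acc : PySem.Dict String Int × Int) t =>
        (acc.1.insert t (acc.1.getD t 0 + 1),
         if acc.2 < (t.toList.length : Int) then (t.toList.length : Int) else acc.2)) (d, x)).2) := by
  induction ts with
  | nil =>
    intro d x
    exact ⟨fun s => by simp, le_rfl, by simp⟩
  | cons t ts ih =>
    intro d x
    simp only [List.foldl_cons]
    obtain ⟨ih1, ih2, ih3⟩ := ih (d.insert t (d.getD t 0 + 1))
      (if x < (t.toList.length : Int) then (t.toList.length : Int) else x)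
    refine ⟨fun s => ?_, ?_, fun t' ht' => ?_⟩
    · rw [ih1 s, PySem.Dict.getD_insert]
      by_cases hs : s = t
      · subst hs
        rw [if_pos rfl]
        simp [List.count_cons]
        ring
      · rw [if_neg hs]
        have hst : t ≠ s := fun h => hs h.symm
        simp [List.count_cons, hs, hst]
    · refine le_trans ?_ ih2
      split_ifs with h <;> omega
    · rcases List.mem_cons.1 ht' with h | h
      · subst h
        refine le_trans ?_ ih2
        split_ifs with h <;> omega
      · exact ih3 t' h

-- under Pre_ every Epow suffix weight is 1 and wsum collapses to the occurrence count
theorem Epow_of_not_mem (ts : List String) (h : "" ∉ ts) : Epow ts = 1 := by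
  simp [Epow, List.count_eq_zero_of_not_mem h]

theorem wsum_count (s : String) (ts : List String) (h : "" ∉ ts) :
    wsum s (wt ts) = (ts.count s : Int) := by
  induction ts with
  | nil => simp [wsum, wt]
  | cons t ts ih =>
    have ht : t ≠ "" := fun he => h (he ▸ List.mem_cons_self)
    have h' : "" ∉ ts := fun he => h (List.mem_cons_of_mem _ he)
    have hwt : wt (t :: ts) = (t, Epow ts) :: wt ts := by simp [wt, ht]
    rw [hwt]
    simp only [wsum, List.map_cons, List.sum_cons] at *
    rw [ih h', Epow_of_not_mem ts h']
    by_cases hs : t = s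
    · subst hs
      simp [List.count_cons]
      ring
    · simp [List.count_cons, hs, fun h : s = t => hs h.symm]

-- with no empty towel after a nonempty one, every weight is 1 and wsum is the occurrence count
theorem wsum_dropWhile (s : String) (hs : s ≠ "") :
    ∀ ts : List String, (∀ t ∈ ts.dropWhile (fun t => t = ""), t ≠ "") →
    wsum s (wt ts) = (ts.count s : Int) := by
  intro ts
  induction ts with
  | nil => intro _; simp [wsum, wt]
  | cons t ts ih =>
    intro h
    by_cases ht : t = ""
    · subst ht
      rw [List.dropWhile_cons] at h
      simp only [decide_true, if_true] at h
      have hwt : wt ("" :: ts) = wt ts := by simp [wt]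
      rw [hwt, ih h]
      have hse : ¬ (s = "") := hs
      simp [List.count_cons, hse]
    · have hall : ∀ u ∈ t :: ts, u ≠ "" := by
        rw [List.dropWhile_cons] at h
        simpa [ht] using h
      have hnm : "" ∉ t :: ts := fun hmem => hall "" hmem rfl
      exact wsum_count s (t :: ts) hnm

-- a probed substring of positive length is a nonempty string
theorem slice_ne_empty (p : List Char) (k : Nat) (hk : k ≤ p.length) (m : Int)
    (h1 : 1 ≤ m) (h2 : m ≤ (k : Int)) :
    String.ofList (PySem.List.slice p (some ((k : Int) - m)) (some (k : Int))) ≠ "" := by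
  rw [show (k : Int) - m = ((k - m.toNat : Nat) : Int) by omega, PySem.List.slice_natCast]
  intro h
  have hlist := congrArg String.toList h
  rw [String.toList_ofList] at hlist
  have hlen := congrArg List.length hlist
  simp only [List.length_take, List.length_drop] at hlen
  simp at hlen
  omega

-- sum over a Nodup list of a single-hit function
theorem sum_single_hit (g : Int → Int) (ℓ : Int) :
    ∀ (L : List Int), L.Nodup →
    (L.map (fun m => if m = ℓ then g m else 0)).sum = if ℓ ∈ L then g ℓ else 0 := by
  intro L
  induction L with
  | nil => simp
  | cons m L ih =>
    intro hnd
    simp only [List.map_cons, List.sum_cons, List.mem_cons]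
    rcases List.nodup_cons.1 hnd with ⟨hm, hnd'⟩
    rw [ih hnd']
    by_cases h : m = ℓ
    · subst h; simp [hm]
    · simp [h, Ne.symm h]

-- the substring probed at length m ∈ [1, k] equals towel t iff m = |t| and t matches ending at k
theorem sub_eq_iff (p : List Char) (k : Nat) (hk : k ≤ p.length) (t : String)
    (m : Int) (hm1 : 1 ≤ m) (hmk : m ≤ (k : Int)) :
    t = String.ofList (PySem.List.slice p (some ((k : Int) - m)) (some (k : Int)))
      ↔ (m = (t.toList.length : Int) ∧ t.toList <+: p.drop (k - t.toList.length)) := by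
  have hmn : m.toNat ≤ k := by omega
  have h1 : (k : Int) - m = ((k - m.toNat : Nat) : Int) := by omega
  rw [h1, PySem.List.slice_natCast]
  have h2 : k - (k - m.toNat) = m.toNat := by omega
  rw [h2]
  have hlen : ((p.drop (k - m.toNat)).take m.toNat).length = m.toNat := by
    simp only [List.length_take, List.length_drop]
    omega
  constructor
  · intro h
    have hTL : t.toList = (p.drop (k - m.toNat)).take m.toNat := by
      rw [h, String.toList_ofList]
    have hL : t.toList.length = m.toNat := by rw [hTL, hlen]
    have hm : m = (t.toList.length : Int) := by omega
    refine ⟨hm, ?_⟩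
    rw [show k - t.toList.length = k - m.toNat by omega]
    rw [List.prefix_iff_eq_take, hTL, hlen]
  · rintro ⟨hm, hpre⟩
    have hL : t.toList.length = m.toNat := by omega
    rw [List.prefix_iff_eq_take] at hpre
    rw [← String.toList_inj, String.toList_ofList, hpre, hL]

theorem countSum (p : List Char) (prev : List Int) (k : Nat) (K : Int)
    (hk : k ≤ p.length) :
    ∀ (es : List (String × Int)),
    (∀ e ∈ es, e.1.toList.length ≠ 0 ∧ (e.1.toList.length : Int) ≤ K) →
    ((PySem.List.pyRange 1 (min (k : Int) K + 1) 1).map (fun m =>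
        wsum (String.ofList (PySem.List.slice p (some ((k : Int) - m)) (some (k : Int)))) es
          * PySem.List.pyGetD prev ((k : Int) - m) 0)).sum
      = (es.map (termW p prev k)).sum := by
  intro es
  induction es with
  | nil => simp [wsum]
  | cons e es ih =>
    intro hes
    obtain ⟨ht0, htK⟩ := hes e (by simp)
    have hes' : ∀ e' ∈ es, e'.1.toList.length ≠ 0 ∧ (e'.1.toList.length : Int) ≤ K :=
      fun e' h => hes e' (List.mem_cons_of_mem _ h)
    set L := PySem.List.pyRange 1 (min (k : Int) K + 1) 1 with hL
    have hmemL : ∀ m ∈ L, 1 ≤ m ∧ m ≤ (k : Int) ∧ m ≤ K := by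
      intro m hm
      rw [hL, PySem.List.mem_pyRange_one] at hm
      refine ⟨hm.1, by omega, by omega⟩
    have hsplit : (L.map (fun m =>
        wsum (String.ofList (PySem.List.slice p (some ((k : Int) - m)) (some (k : Int)))) (e :: es)
          * PySem.List.pyGetD prev ((k : Int) - m) 0))
      = (L.map (fun m =>
        wsum (String.ofList (PySem.List.slice p (some ((k : Int) - m)) (some (k : Int)))) es
          * PySem.List.pyGetD prev ((k : Int) - m) 0
        + (if e.1 = String.ofList (PySem.List.slice p (some ((k : Int) - m)) (some (k : Int)))
           then e.2 * PySem.List.pyGetD prev ((k : Int) - m) 0 else 0))) := by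
      apply List.map_congr_left
      intro m _
      have : wsum (String.ofList (PySem.List.slice p (some ((k : Int) - m)) (some (k : Int)))) (e :: es)
          = (if e.1 = String.ofList (PySem.List.slice p (some ((k : Int) - m)) (some (k : Int)))
             then e.2 else 0)
            + wsum (String.ofList (PySem.List.slice p (some ((k : Int) - m)) (some (k : Int)))) es := by
        simp [wsum]
      rw [this, add_mul]
      split_ifs with h
      · ring
      · ring
    rw [hsplit, PySem.List.sum_map_add_int, ih hes']
    have hpoint : ∀ m ∈ L,
        (if e.1 = String.ofList (PySem.List.slice p (some ((k : Int) - m)) (some (k : Int)))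
         then e.2 * PySem.List.pyGetD prev ((k : Int) - m) 0 else 0)
      = (if e.1.toList <+: p.drop (k - e.1.toList.length)
         then (if m = (e.1.toList.length : Int) then e.2 * PySem.List.pyGetD prev ((k : Int) - m) 0 else 0)
         else 0) := by
      intro m hm
      obtain ⟨h1, h2, _⟩ := hmemL m hm
      rw [if_congr (sub_eq_iff p k hk e.1 m h1 h2) rfl rfl]
      split_ifs <;> tauto
    have hsingle : (L.map (fun m =>
        if e.1 = String.ofList (PySem.List.slice p (some ((k : Int) - m)) (some (k : Int)))
        then e.2 * PySem.List.pyGetD prev ((k : Int) - m) 0 else 0)).sum = termW p prev k e := by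
      rw [List.map_congr_left hpoint]
      by_cases hP : e.1.toList <+: p.drop (k - e.1.toList.length)
      · simp only [if_pos hP]
        rw [sum_single_hit (fun m => e.2 * PySem.List.pyGetD prev ((k : Int) - m) 0)
          (e.1.toList.length : Int) L (by rw [hL]; exact PySem.List.nodup_pyRange_one 1 _)]
        have hmemiff : ((e.1.toList.length : Int) ∈ L) ↔ e.1.toList.length ≤ k := by
          rw [hL, PySem.List.mem_pyRange_one]
          omega
        by_cases hlek : e.1.toList.length ≤ k
        · rw [if_pos (hmemiff.2 hlek)]
          unfold termW
          rw [if_pos ⟨hlek, hP⟩]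
          rw [show (k : Int) - (e.1.toList.length : Int) = ((k - e.1.toList.length : Nat) : Int) by omega,
            PySem.List.pyGetD_natCast]
        · rw [if_neg (fun h => hlek (hmemiff.1 h))]
          unfold termW
          rw [if_neg (fun h => hlek h.1)]
      · simp only [if_neg hP]
        have h0 : (L.map (fun _ => (0 : Int))).sum = 0 := by simp
        rw [h0]
        unfold termW
        rw [if_neg (fun h => hP h.2)]
    rw [hsingle, List.map_cons, List.sum_cons]
    ring

theorem rowB_loop (towels : List String) (cnt : PySem.Dict String Int) (K : Int) (p : List Char)
    (hcnt : ∀ s, s ≠ "" → cnt.getD s 0 = wsum s (wt towels))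
    (hK : ∀ e ∈ wt towels, (e.1.toList.length : Int) ≤ K) :
    ∀ j, j ≤ p.length →
    (PySem.List.pyRange 1 ((j : Int) + 1) 1).foldl (fun dp i =>
      dp ++ [(PySem.List.pyRange 1 (min i K + 1) 1).foldl (fun acc m =>
        acc + cnt.getD (String.ofList (PySem.List.slice p (some (i - m)) (some i))) 0
                * PySem.List.pyGetD dp (i - m) 0) 0]) [(1 : Int)]
      = dpRef p towels j := by
  intro j
  induction j with
  | zero =>
    intro _
    rw [show ((0 : Nat) : Int) + 1 = 1 by norm_num, PySem.List.pyRange_one_eq_nil le_rfl]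
    simp [dpRef]
  | succ j ih =>
    intro hj
    have hj' : j ≤ p.length := Nat.le_of_succ_le hj
    rw [show ((j + 1 : Nat) : Int) + 1 = ((j : Int) + 1) + 1 by push_cast; ring,
      PySem.List.pyRange_one_succ_right (by omega), List.foldl_append]
    rw [ih hj']
    simp only [List.foldl_cons, List.foldl_nil]
    rw [show ((j : Int) + 1) = ((j + 1 : Nat) : Int) by push_cast; ring]
    rw [PySem.List.foldl_add, zero_add]
    have hmapc : ((PySem.List.pyRange 1 (min ((j + 1 : Nat) : Int) K + 1) 1).map (fun m =>
        cnt.getD (String.ofList (PySem.List.slice p (some (((j + 1 : Nat) : Int) - m)) (some ((j + 1 : Nat) : Int)))) 0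
          * PySem.List.pyGetD (dpRef p towels j) (((j + 1 : Nat) : Int) - m) 0))
      = ((PySem.List.pyRange 1 (min ((j + 1 : Nat) : Int) K + 1) 1).map (fun m =>
        wsum (String.ofList (PySem.List.slice p (some (((j + 1 : Nat) : Int) - m)) (some ((j + 1 : Nat) : Int)))) (wt towels)
          * PySem.List.pyGetD (dpRef p towels j) (((j + 1 : Nat) : Int) - m) 0)) := by
      apply List.map_congr_left
      intro m hm
      rw [PySem.List.mem_pyRange_one] at hm
      rw [hcnt _ (slice_ne_empty p (j + 1) hj m hm.1 (by omega))]
    rw [hmapc, countSum p (dpRef p towels j) (j + 1) K hj (wt towels)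
      (fun e he => ⟨ne_empty_len e.1 (wt_mem towels e he).2, hK e he⟩)]
    simp [dpRef]

theorem rowB_eq (towels : List String) (cnt : PySem.Dict String Int) (K : Int) (pattern : String)
    (hcnt : ∀ s, s ≠ "" → cnt.getD s 0 = wsum s (wt towels))
    (hK : ∀ e ∈ wt towels, (e.1.toList.length : Int) ≤ K) :
    rowB cnt K pattern
      = (dpRef pattern.toList towels pattern.toList.length).getD pattern.toList.length 0 := by
  simp only [rowB]
  rw [rowB_loop towels cnt K pattern.toList hcnt hK pattern.toList.length le_rfl]
  simp [PySem.List.pyGetD_natCast]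

-- ===== VERDICT (by name: the statement is the Claim_ definition above) =====
theorem part2_spec : Claim_equal_part2 := by
  intro patterns towels _ hpre
  unfold Pre_part2 at hpre
  unfold Spec_part2 part2 part2_alt
  rw [PySem.List.foldl_append_singleton_eq_map (rowA towels) patterns [], List.nil_append]
  simp only []
  rw [PySem.List.foldl_add]
  set idx := towels.foldl (fun (acc : PySem.Dict String Int × Int) t =>
      (acc.1.insert t (acc.1.getD t 0 + 1),
       if acc.2 < (t.toList.length : Int) then (t.toList.length : Int) else acc.2))
    (PySem.Dict.empty, 0) with hidx
  obtain ⟨h1, _, h3⟩ := idxF towels PySem.Dict.empty 0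
  have hcnt : ∀ s, s ≠ "" → idx.1.getD s 0 = wsum s (wt towels) := by
    intro s hs
    rw [hidx, h1 s, wsum_dropWhile s hs towels hpre]
    simp [PySem.Dict.getD_empty]
  have hK : ∀ e ∈ wt towels, (e.1.toList.length : Int) ≤ idx.2 := by
    intro e he
    obtain ⟨hmem, _⟩ := wt_mem towels e he
    rw [hidx]
    exact h3 e.1 hmem
  rw [zero_add]
  congr 1
  apply List.map_congr_left
  intro pat _
  rw [rowA_eq towels pat,
    rowB_eq towels idx.1 idx.2 pat hcnt hK]
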